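-- pv_equiv track=rewrite | github.com/GuidoPaul/CAIL2019 | train/train_utils.py | evaluate
-- ===== SOURCE A (Python) =====
-- def evaluate(probs):
--     correct = 0
--     for i, prob in enumerate(probs):
--         if i % 2 == 0 and prob <= 0:
--             correct += 1
--         if i % 2 == 1 and prob > 0:
--             correct += 1
--     return correct
-- ===== SOURCE B (Python) =====
-- def evaluate(probs):
--     evens = probs[::2]
--     odds = probs[1::2]
--     return sum(1 for p in evens if p <= 0) + sum(1 for p in odds if p > 0)
-- ===== Notes on version B (the rewrite author's own statement) =====
-- stated objective: faster
-- what changed: Replaces the enumerate loop with i%2 parity branches by two parity slices (probs[::2], probs[1::2]) each counted in one pass, removing the per-element index and parity test.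
import Mathlib
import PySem

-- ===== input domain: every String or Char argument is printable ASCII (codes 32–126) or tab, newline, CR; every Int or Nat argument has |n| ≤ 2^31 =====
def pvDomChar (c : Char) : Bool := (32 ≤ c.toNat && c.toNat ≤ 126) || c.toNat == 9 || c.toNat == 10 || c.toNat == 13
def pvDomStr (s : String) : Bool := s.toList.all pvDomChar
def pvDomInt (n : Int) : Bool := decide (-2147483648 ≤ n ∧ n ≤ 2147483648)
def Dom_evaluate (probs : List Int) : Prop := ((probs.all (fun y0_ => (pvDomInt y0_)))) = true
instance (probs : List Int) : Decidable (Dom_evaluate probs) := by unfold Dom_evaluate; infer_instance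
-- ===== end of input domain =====

-- B replaces A's single enumerate loop with i%2 branches by two parity slices counted separately (objective: simpler).

-- ===== PORT A =====
-- for i, prob in enumerate(probs): if i%2==0 and prob<=0: correct+=1; if i%2==1 and prob>0: correct+=1
def evaluate (probs : List Int) : Int :=
  (PySem.List.enumerate probs).foldl
    (fun correct ip =>
      let correct := if PySem.Int.mod ip.1 2 = 0 ∧ ip.2 ≤ 0 then correct + 1 else correct
      if PySem.Int.mod ip.1 2 = 1 ∧ ip.2 > 0 then correct + 1 else correct)
    0

-- ===== PORT B =====
-- evens = probs[::2]; odds = probs[1::2]; sum over each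
def evaluate_alt (probs : List Int) : Int :=
  let evens := (PySem.List.slice? probs none none 2).getD []
  let odds := (PySem.List.slice? probs (some 1) none 2).getD []
  ((evens.countP (fun p => p ≤ 0) : Int)) + ((odds.countP (fun p => 0 < p) : Int))

-- ===== PRECONDITION & SPEC =====
def Spec_evaluate (probs : List Int) (out : Int) : Prop := out = evaluate_alt probs
instance (probs : List Int) (out : Int) : Decidable (Spec_evaluate probs out) := by unfold Spec_evaluate; infer_instance

-- ===== CLAIM (what is proved, stated in full; the proofs are below) =====
def Claim_equal_evaluate : Prop := ∀ (probs : List Int), Dom_evaluate probs → Spec_evaluate probs (evaluate probs)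

-- ===== LEMMAS AND PROOFS =====

def deE : List Int → List Int
  | [] => [] | [a] => [a] | a :: _ :: xs => a :: deE xs
def deO : List Int → List Int
  | [] => [] | [_] => [] | _ :: b :: xs => b :: deO xs

theorem fm_even (xs : List Int) :
    List.filterMap (fun (k : Nat) => xs[((2:Int) * (k:Int)).toNat]?) (List.range ((xs.length + 1)/2)) = deE xs := by
  induction xs using deE.induct with
  | case1 => simp [deE]
  | case2 a => simp [deE, List.range_succ]
  | case3 a b xs ih =>
      have hc : ((a :: b :: xs).length + 1)/2 = ((xs.length+1)/2) + 1 := by simp; omega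
      rw [hc, List.range_succ_eq_map]
      simp only [List.filterMap_cons, List.filterMap_map]
      have h0 : ((2:Int) * ((0:Nat):Int)).toNat = 0 := by simp
      have hfun : ∀ k : Nat, (a::b::xs)[(2 * ((Nat.succ k : Nat):Int)).toNat]? = xs[(2*(k:Int)).toNat]? := by
        intro k
        have h1 : ((2:Int) * ((Nat.succ k : Nat):Int)).toNat = 2*k+2 := by push_cast; omega
        have h2 : ((2:Int)*(k:Int)).toNat = 2*k := by omega
        rw [h1, h2]
        simp
      simp only [Function.comp_def, hfun]
      simp [deE, ih]
theorem slice_evens (xs : List Int) : (PySem.List.slice? xs none none 2).getD [] = deE xs := by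
  simp [PySem.List.slice?, PySem.List.sliceIndices]
  have : (if 0 < xs.length then (((xs.length:Int) + 2 - 1) / 2).toNat else 0) = (xs.length + 1)/2 := by
    split_ifs <;> omega
  rw [this, fm_even]
theorem fm_odd (xs : List Int) :
    List.filterMap (fun (k : Nat) => xs[((1:Int) + 2 * (k:Int)).toNat]?) (List.range (xs.length / 2)) = deO xs := by
  induction xs using deO.induct with
  | case1 => simp [deO]
  | case2 a => simp [deO]
  | case3 a b xs ih =>
      have hc : (a :: b :: xs).length / 2 = xs.length / 2 + 1 := by simp; omega
      rw [hc, List.range_succ_eq_map]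
      simp only [List.filterMap_cons, List.filterMap_map]
      have hfun : ∀ k : Nat, (a::b::xs)[((1:Int) + 2 * ((Nat.succ k : Nat):Int)).toNat]? = xs[((1:Int) + 2*(k:Int)).toNat]? := by
        intro k
        have h1 : ((1:Int) + 2 * ((Nat.succ k : Nat):Int)).toNat = (1 + 2*k) + 2 := by push_cast; omega
        have h2 : ((1:Int) + 2*(k:Int)).toNat = 1 + 2*k := by omega
        rw [h1, h2]
        simp
      simp only [Function.comp_def, hfun]
      simp [deO, ih]

theorem slice_odds (xs : List Int) : (PySem.List.slice? xs (some 1) none 2).getD [] = deO xs := by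
  cases xs with
  | nil => simp [PySem.List.slice?, PySem.List.sliceIndices, deO]
  | cons a t =>
      simp [PySem.List.slice?, PySem.List.sliceIndices]
      have hcnt : (if 0 < t.length then (((t.length:Int) + 2 - 1) / 2).toNat else 0) = (a::t).length / 2 := by
        split_ifs <;> simp <;> omega
      rw [hcnt, fm_odd]


theorem pymod2 (s : Int) : PySem.Int.mod s 2 = s % 2 := by
  simp [PySem.Int.mod, Int.fmod_eq_emod]

theorem foldl_pair (xs : List Int) (s : Int) (c : Int) (hs : 0 ≤ s) (he : s % 2 = 0) :
    (PySem.List.enumerate xs s).foldl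
      (fun correct ip =>
        let correct := if PySem.Int.mod ip.1 2 = 0 ∧ ip.2 ≤ 0 then correct + 1 else correct
        if PySem.Int.mod ip.1 2 = 1 ∧ ip.2 > 0 then correct + 1 else correct) c
    = c + ((deE xs).countP (fun p => p ≤ 0) : Int) + ((deO xs).countP (fun p => 0 < p) : Int) := by
  induction xs using deE.induct generalizing s c with
  | case1 => simp [deE, deO, PySem.List.enumerate_nil]
  | case2 a =>
      simp [deE, deO, PySem.List.enumerate_cons, PySem.List.enumerate_nil, he]
      split_ifs with h1 <;> simp <;> omega
  | case3 a b xs ih =>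
      rw [PySem.List.enumerate_cons, PySem.List.enumerate_cons]
      simp only [List.foldl_cons]
      rw [ih (s + 1 + 1) _ (by omega) (by omega)]
      simp only [deE, deO, pymod2, he, List.countP_cons]
      have h2 : (s + 1) % 2 = 1 := by omega
      rw [h2]
      norm_num
      split_ifs <;> omega

-- ===== VERDICT (by name: the statement is the Claim_ definition above) =====
theorem evaluate_spec : Claim_equal_evaluate := by
  intro probs _
  unfold Spec_evaluate evaluate evaluate_alt
  rw [slice_evens, slice_odds, foldl_pair probs 0 0 (by norm_num) rfl]
  simp
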